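-- pv_equiv track=rewrite | github.com/lucasgattas/comfyui-egregora-tiled | egregora_tile_split_merge.py | _order_spiral
-- ===== SOURCE A (Python) =====
-- def _order_spiral(origins, rows, cols):
--     if not origins or rows == 0 or cols == 0: return []
--     grid = [[r * cols + c for c in range(cols)] for r in range(rows)]
--     top, bottom, left, right = 0, rows - 1, 0, cols - 1
--     idxs = []
--     while top <= bottom and left <= right:
--         for c in range(left, right + 1): idxs.append(grid[top][c])
--         top += 1
--         for r in range(top, bottom + 1): idxs.append(grid[r][right])
--         right -= 1
--         if top <= bottom:
--             for c in range(right, left - 1, -1): idxs.append(grid[bottom][c])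
--             bottom -= 1
--         if left <= right:
--             for r in range(bottom, top - 1, -1): idxs.append(grid[r][left])
--             left += 1
--     return [origins[i] for i in idxs if i < len(origins)]
-- ===== SOURCE B (Python) =====
-- def _order_spiral(origins, rows, cols):
--     if not origins or rows <= 0 or cols <= 0:
--         return []
--     n = len(origins)
--     out = []
--     r, c = 0, -1          # one step before the first cell
--     dr, dc = 0, 1         # heading right
--     horiz, vert = cols, rows - 1   # remaining run lengths
--     while True:
--         steps = horiz if dr == 0 else vert
--         if steps <= 0:
--             break
--         for _ in range(steps):
--             r += dr
--             c += dc
--             i = r * cols + c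
--             if i < n:
--                 out.append(origins[i])
--         if dr == 0:
--             horiz -= 1
--         else:
--             vert -= 1
--         dr, dc = dc, -dr  # rotate clockwise
--     return out
-- ===== Notes on version B (the rewrite author's own statement) =====
-- stated objective: alternative
-- what changed: A shrinks four rectangle boundaries and emits whole rows/columns of a precomputed index grid, then filters at the end; B walks the spiral cell by cell with a position, a clockwise-rotating direction and alternating run lengths (cols, rows-1, cols-1, rows-2, ...), computing each index arithmetically and filtering inline.
import Mathlib
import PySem

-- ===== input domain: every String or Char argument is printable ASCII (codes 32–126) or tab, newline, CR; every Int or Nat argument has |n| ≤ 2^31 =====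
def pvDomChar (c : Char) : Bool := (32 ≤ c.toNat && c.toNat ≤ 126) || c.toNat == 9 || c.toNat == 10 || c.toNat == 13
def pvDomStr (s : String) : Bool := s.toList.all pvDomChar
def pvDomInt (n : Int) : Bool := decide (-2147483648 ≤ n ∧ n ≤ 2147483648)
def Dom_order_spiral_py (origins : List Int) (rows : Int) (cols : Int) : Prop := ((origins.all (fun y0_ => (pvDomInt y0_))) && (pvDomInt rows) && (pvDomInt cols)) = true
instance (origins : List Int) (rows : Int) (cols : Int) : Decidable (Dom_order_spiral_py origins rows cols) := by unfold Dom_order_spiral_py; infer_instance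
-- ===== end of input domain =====

-- B replaces A's four shrinking boundaries by a cell-by-cell spiral walk with alternating
-- run lengths (cols, rows-1, cols-1, rows-2, …), filtering against len(origins) inline;
-- objective: alternative (a structurally different traversal, same cost).

-- ===== PORT A =====
-- termination measure fact for aLoop's while loop (cited by name in decreasing_by)
lemma aLoop_dec (top bottom left right : Int) (h1 : top ≤ bottom) (h2 : left ≤ right) :
    ((if top + 1 ≤ bottom then bottom - 1 else bottom) - (top + 1) +
      (right - 1 - (if left ≤ right - 1 then left + 1 else left)) + 2).toNat <
    (bottom - top + (right - left) + 2).toNat := by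
  have e1 : (if top + 1 ≤ bottom then bottom - 1 else bottom) ≤ bottom := by
    split_ifs
    · exact sub_le_self bottom zero_le_one
    · exact le_refl bottom
  have e2 : left ≤ (if left ≤ right - 1 then left + 1 else left) := by
    split_ifs
    · exact (lt_add_one left).le
    · exact le_refl left
  refine (Int.toNat_lt_toNat (by linarith)).mpr (by linarith)

-- grid[r][c]: both lookups are always in range when A reads them, so pyGetD's default is never used.
def aLoop (grid : List (List Int)) (top bottom left right : Int) (idxs : List Int) : List Int :=
  if _h : top ≤ bottom ∧ left ≤ right then
    -- for c in range(left, right+1): idxs.append(grid[top][c])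
    let idxs := idxs ++ (PySem.List.pyRange left (right + 1) 1).map
      (fun c => PySem.List.pyGetD (PySem.List.pyGetD grid top []) c 0)
    let top := top + 1
    -- for r in range(top, bottom+1): idxs.append(grid[r][right])
    let idxs := idxs ++ (PySem.List.pyRange top (bottom + 1) 1).map
      (fun r => PySem.List.pyGetD (PySem.List.pyGetD grid r []) right 0)
    let right := right - 1
    -- if top <= bottom: for c in range(right, left-1, -1): idxs.append(grid[bottom][c]); bottom -= 1
    let idxs := if top ≤ bottom then
        idxs ++ (PySem.List.pyRange right (left - 1) (-1)).map
          (fun c => PySem.List.pyGetD (PySem.List.pyGetD grid bottom []) c 0)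
      else idxs
    let bottom := if top ≤ bottom then bottom - 1 else bottom
    -- if left <= right: for r in range(bottom, top-1, -1): idxs.append(grid[r][left]); left += 1
    let idxs := if left ≤ right then
        idxs ++ (PySem.List.pyRange bottom (top - 1) (-1)).map
          (fun r => PySem.List.pyGetD (PySem.List.pyGetD grid r []) left 0)
      else idxs
    let left := if left ≤ right then left + 1 else left
    aLoop grid top bottom left right idxs
  else idxs
termination_by ((bottom - top) + (right - left) + 2).toNat
decreasing_by
  exact aLoop_dec _ _ _ _ _h.1 _h.2

def order_spiral_py (origins : List Int) (rows : Int) (cols : Int) : List Int :=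
  if origins = [] ∨ rows = 0 ∨ cols = 0 then []
  else
    -- grid = [[r*cols + c for c in range(cols)] for r in range(rows)]
    let grid := (PySem.List.pyRange 0 rows 1).map
      (fun r => (PySem.List.pyRange 0 cols 1).map (fun c => r * cols + c))
    let idxs := aLoop grid 0 (rows - 1) 0 (cols - 1) []
    -- [origins[i] for i in idxs if i < len(origins)]; every i is ≥ 0, so pyGet? is exact
    idxs.filterMap (fun i => if i < (origins.length : Int) then PySem.List.pyGet? origins i else none)

-- ===== PORT B =====
-- termination measure fact for bLoop's while loop (cited by name in decreasing_by)
lemma bLoop_dec (dr horiz vert : Int) (h : ¬ (if dr = 0 then horiz else vert) ≤ 0) :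
    (if dr = 0 then horiz - 1 else horiz).toNat + (if dr = 0 then vert else vert - 1).toNat <
    horiz.toNat + vert.toNat := by
  by_cases hd : dr = 0
  · simp only [if_pos hd] at h ⊢
    exact Nat.add_lt_add_of_lt_of_le
      ((Int.toNat_lt_toNat (by linarith)).mpr (sub_one_lt horiz)) (le_refl vert.toNat)
  · simp only [if_neg hd] at h ⊢
    exact Nat.add_lt_add_of_le_of_lt (le_refl horiz.toNat)
      ((Int.toNat_lt_toNat (by linarith)).mpr (sub_one_lt vert))

-- for _ in range(steps): r += dr; c += dc; i = r*cols + c; if i < n: out.append(origins[i])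
-- (origins[i] is always in range when appended, so pyGetD's default is never used)
def bRun (origins : List Int) (cols n dr dc : Int) (steps : Int) (st : Int × Int × List Int) :
    Int × Int × List Int :=
  (PySem.List.pyRange 0 steps 1).foldl (fun st _ =>
    let r := st.1 + dr
    let c := st.2.1 + dc
    let i := r * cols + c
    (r, c, if i < n then st.2.2 ++ [PySem.List.pyGetD origins i 0] else st.2.2)) st

def bLoop (origins : List Int) (cols n r c dr dc horiz vert : Int) (out : List Int) : List Int :=
  let steps := if dr = 0 then horiz else vert
  if _h : steps ≤ 0 then out
  else
    let st := bRun origins cols n dr dc steps (r, c, out)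
    let horiz' := if dr = 0 then horiz - 1 else horiz
    let vert' := if dr = 0 then vert else vert - 1
    bLoop origins cols n st.1 st.2.1 dc (-dr) horiz' vert' st.2.2
termination_by horiz.toNat + vert.toNat
decreasing_by
  simp only [steps] at _h
  exact bLoop_dec dr horiz vert _h

def order_spiral_py_alt (origins : List Int) (rows : Int) (cols : Int) : List Int :=
  if origins = [] ∨ rows ≤ 0 ∨ cols ≤ 0 then []
  else bLoop origins cols (origins.length : Int) 0 (-1) 0 1 cols (rows - 1) []

-- ===== PRECONDITION & SPEC =====
def Spec_order_spiral_py (origins : List Int) (rows : Int) (cols : Int) (out : List Int) : Prop := out = order_spiral_py_alt origins rows cols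
instance (origins : List Int) (rows : Int) (cols : Int) (out : List Int) : Decidable (Spec_order_spiral_py origins rows cols out) := by unfold Spec_order_spiral_py; infer_instance

-- ===== CLAIM (what is proved, stated in full; the proofs are below) =====
def Claim_equal_order_spiral_py : Prop := ∀ (origins : List Int) (rows : Int) (cols : Int), Dom_order_spiral_py origins rows cols → Spec_order_spiral_py origins rows cols (order_spiral_py origins rows cols)

-- ===== LEMMAS AND PROOFS =====

def pvF (origins : List Int) (i : Int) : Option Int :=
  if i < (origins.length : Int) then PySem.List.pyGet? origins i else none

def pvFB (origins : List Int) (i : Int) : Option Int :=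
  if i < (origins.length : Int) then some (PySem.List.pyGetD origins i 0) else none

lemma pvF_eq (origins : List Int) (i : Int) (hi : 0 ≤ i) : pvF origins i = pvFB origins i := by
  unfold pvF pvFB
  split_ifs with h
  · rw [PySem.List.pyGet?_eq_some_getElem origins hi h, PySem.List.pyGetD_eq_getElem origins 0 hi h]
  · rfl

lemma pv_filterMap_F_eq (origins : List Int) (xs : List Int) (h : ∀ x ∈ xs, 0 ≤ x) :
    xs.filterMap (pvF origins) = xs.filterMap (pvFB origins) := by
  induction xs with
  | nil => rfl
  | cons a xs ih =>
    simp only [List.filterMap_cons]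
    rw [pvF_eq origins a (h a (by simp))]
    cases pvFB origins a <;> simp [ih (fun x hx => h x (by simp [hx]))]

lemma pv_filterMap_F_eq' (origins : List Int) (xs : List Int) (h : ∀ x ∈ xs, 0 ≤ x) :
    xs.filterMap (pvF origins) =
      xs.filterMap (fun i => if i < (origins.length:Int) then some (PySem.List.pyGetD origins i 0) else none) := by
  rw [pv_filterMap_F_eq origins xs h]; rfl

lemma bRun_spec (origins : List Int) (cols n dr dc : Int) (s : Nat) (r c : Int) (out : List Int) :
    bRun origins cols n dr dc (s : Int) (r, c, out) =
      (r + s * dr, c + s * dc,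
       out ++ ((List.range s).map (fun (k : Nat) => (r + ((k:Int)+1)*dr) * cols + (c + ((k:Int)+1)*dc))).filterMap
         (fun i => if i < n then some (PySem.List.pyGetD origins i 0) else none)) := by
  induction s generalizing out with
  | zero => simp [bRun, PySem.List.pyRange_one_eq_nil]
  | succ m ih =>
    unfold bRun at ih ⊢
    rw [show ((m+1:Nat):Int) = (m:Int)+1 by push_cast; ring,
        PySem.List.pyRange_one_succ_right (by positivity), List.foldl_append, ih]
    simp only [List.foldl_cons, List.foldl_nil, List.range_succ, List.map_append,
      List.filterMap_append, List.map_cons, List.map_nil, List.filterMap_cons,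
      List.filterMap_nil, Prod.mk.injEq]
    refine ⟨by push_cast; ring, by push_cast; ring, ?_⟩
    have he : (r + ↑m * dr + dr) * cols + (c + ↑m * dc + dc)
        = (r + ((m:Int) + 1) * dr) * cols + (c + ((m:Int) + 1) * dc) := by push_cast; ring
    rw [he]
    split_ifs with hx <;> simp [List.filterMap_cons, hx, List.append_assoc]

def pvGrid (rows cols : Int) : List (List Int) :=
  (PySem.List.pyRange 0 rows 1).map (fun r => (PySem.List.pyRange 0 cols 1).map (fun c => r * cols + c))

lemma grid_get (rows cols rr cc : Int) (h1 : 0 ≤ rr) (h2 : rr < rows) (h3 : 0 ≤ cc) (h4 : cc < cols) :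
    PySem.List.pyGetD (PySem.List.pyGetD (pvGrid rows cols) rr []) cc 0 = rr * cols + cc := by
  unfold pvGrid
  rw [PySem.List.pyGetD_map_pyRange_of_nonneg _ rows rr _ h1 h2,
      PySem.List.pyGetD_map_pyRange_of_nonneg _ cols cc _ h3 h4]

-- unfolding lemmas
lemma bLoop_stop (origins : List Int) (cols n r c dr dc horiz vert : Int) (out : List Int)
    (h : (if dr = 0 then horiz else vert) ≤ 0) :
    bLoop origins cols n r c dr dc horiz vert out = out := by
  rw [bLoop]
  simp only [dif_pos h]

lemma bLoop_step (origins : List Int) (cols n r c dr dc horiz vert : Int) (out : List Int)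
    (h : ¬ (if dr = 0 then horiz else vert) ≤ 0) :
    bLoop origins cols n r c dr dc horiz vert out =
      bLoop origins cols n
        (bRun origins cols n dr dc (if dr = 0 then horiz else vert) (r, c, out)).1
        (bRun origins cols n dr dc (if dr = 0 then horiz else vert) (r, c, out)).2.1
        dc (-dr)
        (if dr = 0 then horiz - 1 else horiz) (if dr = 0 then vert else vert - 1)
        (bRun origins cols n dr dc (if dr = 0 then horiz else vert) (r, c, out)).2.2 := by
  conv_lhs => rw [bLoop]
  simp only [dif_neg h]

lemma aLoop_stop (grid : List (List Int)) (top bottom left right : Int) (idxs : List Int)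
    (h : ¬ (top ≤ bottom ∧ left ≤ right)) :
    aLoop grid top bottom left right idxs = idxs := by
  rw [aLoop]
  simp only [dif_neg h]

lemma aLoop_step (grid : List (List Int)) (t b l r : Int) (idxs : List Int)
    (h : t ≤ b ∧ l ≤ r) :
    aLoop grid t b l r idxs =
      aLoop grid (t + 1) (if t + 1 ≤ b then b - 1 else b) (if l ≤ r - 1 then l + 1 else l) (r - 1)
        ((((idxs
          ++ (PySem.List.pyRange l (r + 1) 1).map
               (fun c => PySem.List.pyGetD (PySem.List.pyGetD grid t []) c 0))
          ++ (PySem.List.pyRange (t + 1) (b + 1) 1).map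
               (fun x => PySem.List.pyGetD (PySem.List.pyGetD grid x []) r 0))
          ++ (if t + 1 ≤ b then
                (PySem.List.pyRange (r - 1) (l - 1) (-1)).map
                  (fun c => PySem.List.pyGetD (PySem.List.pyGetD grid b []) c 0)
              else []))
          ++ (if l ≤ r - 1 then
                (PySem.List.pyRange (if t + 1 ≤ b then b - 1 else b) (t + 1 - 1) (-1)).map
                  (fun x => PySem.List.pyGetD (PySem.List.pyGetD grid x []) l 0)
              else [])) := by
  conv_lhs => rw [aLoop]
  simp only [dif_pos h]
  split_ifs <;> simp

-- A-side segments: replace grid lookups by arithmetic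
lemma segA_row (rows cols t a bnd : Int) (h1 : 0 ≤ t) (h2 : t < rows) (h3 : 0 ≤ a) (h4 : bnd ≤ cols) :
    (PySem.List.pyRange a bnd 1).map
        (fun c => PySem.List.pyGetD (PySem.List.pyGetD (pvGrid rows cols) t []) c 0) =
      (PySem.List.pyRange a bnd 1).map (fun c => t * cols + c) := by
  apply List.map_congr_left
  intro c hc
  rw [PySem.List.mem_pyRange_one] at hc
  exact grid_get rows cols t c h1 h2 (by omega) (by omega)

lemma segA_col (rows cols cc a bnd : Int) (h1 : 0 ≤ cc) (h2 : cc < cols) (h3 : 0 ≤ a) (h4 : bnd ≤ rows) :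
    (PySem.List.pyRange a bnd 1).map
        (fun x => PySem.List.pyGetD (PySem.List.pyGetD (pvGrid rows cols) x []) cc 0) =
      (PySem.List.pyRange a bnd 1).map (fun x => x * cols + cc) := by
  apply List.map_congr_left
  intro x hx
  rw [PySem.List.mem_pyRange_one] at hx
  exact grid_get rows cols x cc (by omega) (by omega) h1 h2

lemma segA_row_rev (rows cols t a bnd : Int) (h1 : 0 ≤ t) (h2 : t < rows) (h3 : 0 ≤ bnd + 1) (h4 : a < cols) :
    (PySem.List.pyRange a bnd (-1)).map
        (fun c => PySem.List.pyGetD (PySem.List.pyGetD (pvGrid rows cols) t []) c 0) =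
      (PySem.List.pyRange a bnd (-1)).map (fun c => t * cols + c) := by
  apply List.map_congr_left
  intro c hc
  rw [PySem.List.mem_pyRange_neg_one] at hc
  exact grid_get rows cols t c h1 h2 (by omega) (by omega)

lemma segA_col_rev (rows cols cc a bnd : Int) (h1 : 0 ≤ cc) (h2 : cc < cols) (h3 : 0 ≤ bnd + 1) (h4 : a < rows) :
    (PySem.List.pyRange a bnd (-1)).map
        (fun x => PySem.List.pyGetD (PySem.List.pyGetD (pvGrid rows cols) x []) cc 0) =
      (PySem.List.pyRange a bnd (-1)).map (fun x => x * cols + cc) := by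
  apply List.map_congr_left
  intro x hx
  rw [PySem.List.mem_pyRange_neg_one] at hx
  exact grid_get rows cols x cc (by omega) (by omega) h1 h2

-- B-side run index lists equal the A-side segment index lists
lemma bidx1 (cols t l r : Int) (h : l ≤ r) :
    (List.range (r - l + 1).toNat).map
        (fun (k : Nat) => (t + ((k:Int) + 1) * 0) * cols + ((l - 1) + ((k:Int) + 1) * 1)) =
      (PySem.List.pyRange l (r + 1) 1).map (fun c => t * cols + c) := by
  rw [PySem.List.pyRange_one, List.map_map, show (r + 1 - l).toNat = (r - l + 1).toNat by omega]
  apply List.map_congr_left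
  intro k _
  simp only [Function.comp]
  push_cast
  ring

lemma bidx2 (cols t b r : Int) (h : t ≤ b) :
    (List.range (b - t).toNat).map
        (fun (k : Nat) => (t + ((k:Int) + 1) * 1) * cols + (r + ((k:Int) + 1) * 0)) =
      (PySem.List.pyRange (t + 1) (b + 1) 1).map (fun x => x * cols + r) := by
  rw [PySem.List.pyRange_one, List.map_map, show (b + 1 - (t + 1)).toNat = (b - t).toNat by omega]
  apply List.map_congr_left
  intro k _
  simp only [Function.comp]
  push_cast
  ring

lemma bidx3 (cols b l r : Int) (h : l ≤ r) :
    (List.range (r - l).toNat).map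
        (fun (k : Nat) => (b + ((k:Int) + 1) * 0) * cols + (r + ((k:Int) + 1) * (-1))) =
      (PySem.List.pyRange (r - 1) (l - 1) (-1)).map (fun c => b * cols + c) := by
  rw [PySem.List.pyRange_neg_one, List.map_map, show (r - 1 - (l - 1)).toNat = (r - l).toNat by omega]
  apply List.map_congr_left
  intro k _
  simp only [Function.comp]
  push_cast
  ring

lemma bidx4 (cols t b l : Int) (h : t ≤ b) :
    (List.range (b - t - 1).toNat).map
        (fun (k : Nat) => (b + ((k:Int) + 1) * (-1)) * cols + (l + ((k:Int) + 1) * 0)) =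
      (PySem.List.pyRange (b - 1) t (-1)).map (fun x => x * cols + l) := by
  rw [PySem.List.pyRange_neg_one, List.map_map, show (b - 1 - t).toNat = (b - t - 1).toNat by omega]
  apply List.map_congr_left
  intro k _
  simp only [Function.comp]
  push_cast
  ring

-- every emitted index is nonnegative, so pvFB can be replaced by pvF
lemma segF_row (origins : List Int) (cols t a bnd : Int) (ht : 0 ≤ t) (ha : 0 ≤ a) (hc : 0 ≤ cols) :
    ((PySem.List.pyRange a bnd 1).map (fun c => t * cols + c)).filterMap (fun i => if i < (origins.length:Int) then some (PySem.List.pyGetD origins i 0) else none) =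
      ((PySem.List.pyRange a bnd 1).map (fun c => t * cols + c)).filterMap (pvF origins) := by
  refine (pv_filterMap_F_eq' origins _ ?_).symm
  intro x hx
  simp only [List.mem_map, PySem.List.mem_pyRange_one] at hx
  obtain ⟨c, ⟨hc1, _⟩, rfl⟩ := hx
  have := mul_nonneg ht hc
  omega

lemma segF_col (origins : List Int) (cols cc a bnd : Int) (hcc : 0 ≤ cc) (ha : 0 ≤ a) (hc : 0 ≤ cols) :
    ((PySem.List.pyRange a bnd 1).map (fun x => x * cols + cc)).filterMap (fun i => if i < (origins.length:Int) then some (PySem.List.pyGetD origins i 0) else none) =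
      ((PySem.List.pyRange a bnd 1).map (fun x => x * cols + cc)).filterMap (pvF origins) := by
  refine (pv_filterMap_F_eq' origins _ ?_).symm
  intro x hx
  simp only [List.mem_map, PySem.List.mem_pyRange_one] at hx
  obtain ⟨y, ⟨hy1, _⟩, rfl⟩ := hx
  have := mul_nonneg (le_trans ha hy1) hc
  omega

lemma segF_row_rev (origins : List Int) (cols t a bnd : Int) (ht : 0 ≤ t) (hb : 0 ≤ bnd + 1) (hc : 0 ≤ cols) :
    ((PySem.List.pyRange a bnd (-1)).map (fun c => t * cols + c)).filterMap (fun i => if i < (origins.length:Int) then some (PySem.List.pyGetD origins i 0) else none) =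
      ((PySem.List.pyRange a bnd (-1)).map (fun c => t * cols + c)).filterMap (pvF origins) := by
  refine (pv_filterMap_F_eq' origins _ ?_).symm
  intro x hx
  simp only [List.mem_map, PySem.List.mem_pyRange_neg_one] at hx
  obtain ⟨c, ⟨hc1, _⟩, rfl⟩ := hx
  have := mul_nonneg ht hc
  omega

lemma segF_col_rev (origins : List Int) (cols cc a bnd : Int) (hcc : 0 ≤ cc) (hb : 0 ≤ bnd + 1) (hc : 0 ≤ cols) :
    ((PySem.List.pyRange a bnd (-1)).map (fun x => x * cols + cc)).filterMap (fun i => if i < (origins.length:Int) then some (PySem.List.pyGetD origins i 0) else none) =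
      ((PySem.List.pyRange a bnd (-1)).map (fun x => x * cols + cc)).filterMap (pvF origins) := by
  refine (pv_filterMap_F_eq' origins _ ?_).symm
  intro x hx
  simp only [List.mem_map, PySem.List.mem_pyRange_neg_one] at hx
  obtain ⟨y, ⟨hy1, _⟩, rfl⟩ := hx
  have := mul_nonneg (by omega : (0:Int) ≤ y) hc
  omega

lemma bStep (origins : List Int) (cols n r c dr dc horiz vert : Int) (out : List Int)
    (s : Int) (hs : s = if dr = 0 then horiz else vert) (hpos : 0 < s) :
    bLoop origins cols n r c dr dc horiz vert out =
      bLoop origins cols n (r + s * dr) (c + s * dc) dc (-dr)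
        (if dr = 0 then horiz - 1 else horiz) (if dr = 0 then vert else vert - 1)
        (out ++ ((List.range s.toNat).map
            (fun (k : Nat) => (r + ((k:Int)+1)*dr) * cols + (c + ((k:Int)+1)*dc))).filterMap
          (fun i => if i < n then some (PySem.List.pyGetD origins i 0) else none)) := by
  rw [bLoop_step _ _ _ _ _ _ _ _ _ _ (by rw [← hs]; omega), ← hs]
  obtain ⟨m, rfl⟩ : ∃ m : Nat, s = (m : Int) := ⟨s.toNat, (Int.toNat_of_nonneg hpos.le).symm⟩
  rw [bRun_spec]
  simp

lemma pv_main (origins : List Int) (rows cols : Int) (hr : 1 ≤ rows) (hc : 1 ≤ cols) :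
    ∀ (K : Nat) (t b l r : Int) (acc : List Int),
      ((b - t) + (r - l)).toNat < K →
      0 ≤ t → t ≤ b → b < rows → 0 ≤ l → r < cols →
      bLoop origins cols (origins.length : Int) t (l - 1) 0 1 (r - l + 1) (b - t)
          (acc.filterMap (pvF origins)) =
        (aLoop (pvGrid rows cols) t b l r acc).filterMap (pvF origins) := by
  intro K
  induction K with
  | zero => intro t b l r acc hK; omega
  | succ K ih =>
    intro t b l r acc hK h0t htb hbr h0l hrc
    by_cases hlr : l ≤ r
    · -- first run: right along the top row
      rw [bStep origins cols _ t (l-1) 0 1 (r-l+1) (b-t) _ (r-l+1) (by norm_num) (by omega)]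
      rw [show t + (r-l+1)*0 = t from by ring, show (l-1) + (r-l+1)*1 = r from by ring]
      simp only [Int.reduceEq, reduceIte, neg_zero, neg_neg]
      by_cases h1 : t < b
      · -- second run: down the right column
        rw [bStep origins cols _ t r 1 0 (r-l+1-1) (b-t) _ (b-t) (by norm_num) (by omega)]
        rw [show t + (b-t)*1 = b from by ring, show r + (b-t)*0 = r from by ring]
        try simp only [Int.reduceEq, reduceIte, neg_zero, neg_neg]
        by_cases h2 : l < r
        · -- third run: left along the bottom row
          rw [bStep origins cols _ b r 0 (-1) (r-l+1-1) (b-t-1) _ (r-l+1-1) (by norm_num) (by omega)]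
          rw [show b + (r-l+1-1)*0 = b from by ring, show r + (r-l+1-1)*(-1) = l from by ring,
              show r-l+1-1 = r-l from by ring]
          try simp only [Int.reduceEq, reduceIte, neg_zero, neg_neg]
          by_cases h3 : t + 1 < b
          · -- fourth run: up the left column, then recurse
            rw [bStep origins cols _ b l (-1) 0 (r-l-1) (b-t-1) _ (b-t-1) (by norm_num) (by omega)]
            rw [show b + (b-t-1)*(-1) = t+1 from by ring, show l + (b-t-1)*0 = l from by ring]
            try simp only [Int.reduceEq, reduceIte, neg_zero, neg_neg]
            rw [aLoop_step _ _ _ _ _ _ ⟨htb, hlr⟩]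
            simp only [if_pos (show t+1 ≤ b from by omega), if_pos (show l ≤ r-1 from by omega)]
            rw [show t+1-1 = t from by ring]
            rw [← ih (t+1) (b-1) (l+1) (r-1) _ (by omega) (by omega) (by omega) (by omega)
                  (by omega) (by omega)]
            rw [show (l+1)-1 = l from by ring, show (r-1)-(l+1)+1 = r-l-1 from by ring,
                show (b-1)-(t+1) = b-t-1-1 from by ring]
            congr 1
            rw [bidx1 cols t l r (by omega), bidx2 cols t b r (by omega),
                bidx3 cols b l r (by omega), bidx4 cols t b l (by omega),
                segF_row origins cols t l (r+1) h0t h0l (by omega),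
                segF_col origins cols r (t+1) (b+1) (by omega) (by omega) (by omega),
                segF_row_rev origins cols b (r-1) (l-1) (by omega) (by omega) (by omega),
                segF_col_rev origins cols l (b-1) t h0l (by omega) (by omega),
                segA_row rows cols t l (r+1) h0t (by omega) h0l (by omega),
                segA_col rows cols r (t+1) (b+1) (by omega) hrc (by omega) (by omega),
                segA_row_rev rows cols b (r-1) (l-1) (by omega) hbr (by omega) (by omega),
                segA_col_rev rows cols l (b-1) t h0l (by omega) (by omega) (by omega)]
            simp [List.filterMap_append, List.append_assoc]
          · -- bottom row reached (b = t+1): B stops after the third run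
            rw [bLoop_stop _ _ _ _ _ _ _ _ _ _ (by norm_num; omega)]
            rw [aLoop_step _ _ _ _ _ _ ⟨htb, hlr⟩]
            simp only [if_pos (show t+1 ≤ b from by omega), if_pos (show l ≤ r-1 from by omega)]
            rw [aLoop_stop _ _ _ _ _ _ (by omega)]
            simp only [PySem.List.pyRange_neg_one_eq_nil (show b-1 ≤ t+1-1 from by omega),
              List.map_nil, List.append_nil]
            rw [bidx1 cols t l r (by omega), bidx2 cols t b r (by omega),
                bidx3 cols b l r (by omega),
                segF_row origins cols t l (r+1) h0t h0l (by omega),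
                segF_col origins cols r (t+1) (b+1) (by omega) (by omega) (by omega),
                segF_row_rev origins cols b (r-1) (l-1) (by omega) (by omega) (by omega),
                segA_row rows cols t l (r+1) h0t (by omega) h0l (by omega),
                segA_col rows cols r (t+1) (b+1) (by omega) hrc (by omega) (by omega),
                segA_row_rev rows cols b (r-1) (l-1) (by omega) hbr (by omega) (by omega)]
            simp [List.filterMap_append, List.append_assoc]
        · -- single column left (l = r): B stops after the second run
          rw [bLoop_stop _ _ _ _ _ _ _ _ _ _ (by norm_num; omega)]
          rw [aLoop_step _ _ _ _ _ _ ⟨htb, hlr⟩]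
          simp only [if_pos (show t+1 ≤ b from by omega), if_neg (show ¬ l ≤ r-1 from by omega)]
          rw [aLoop_stop _ _ _ _ _ _ (by omega)]
          simp only [PySem.List.pyRange_neg_one_eq_nil (show r-1 ≤ l-1 from by omega),
            List.map_nil, List.append_nil]
          rw [bidx1 cols t l r (by omega), bidx2 cols t b r (by omega),
              segF_row origins cols t l (r+1) h0t h0l (by omega),
              segF_col origins cols r (t+1) (b+1) (by omega) (by omega) (by omega),
              segA_row rows cols t l (r+1) h0t (by omega) h0l (by omega),
              segA_col rows cols r (t+1) (b+1) (by omega) hrc (by omega) (by omega)]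
          simp [List.filterMap_append, List.append_assoc]
      · -- single row left: B stops after the first run
        rw [bLoop_stop _ _ _ _ _ _ _ _ _ _ (by norm_num; omega)]
        rw [aLoop_step _ _ _ _ _ _ ⟨htb, hlr⟩,
            aLoop_stop _ _ _ _ _ _ (by omega)]
        have hbt : b = t := by omega
        subst hbt
        simp only [if_neg (show ¬ (b + 1 ≤ b) from by omega),
          PySem.List.pyRange_one_eq_nil (le_refl (b+1)),
          PySem.List.pyRange_neg_one_eq_nil (show (b:Int) ≤ b + 1 - 1 from by omega),
          List.map_nil, List.append_nil, ite_self]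
        rw [bidx1 cols b l r hlr, segF_row origins cols b l (r+1) h0t h0l (by omega),
            segA_row rows cols b l (r+1) h0t hbr h0l (by omega)]
        simp [List.filterMap_append]
    · rw [aLoop_stop _ _ _ _ _ _ (by tauto),
          bLoop_stop _ _ _ _ _ _ _ _ _ _ (by norm_num; omega)]

-- ===== VERDICT (by name: the statement is the Claim_ definition above) =====
theorem order_spiral_py_spec : Claim_equal_order_spiral_py := by
  unfold Claim_equal_order_spiral_py Spec_order_spiral_py
  intro origins rows cols _dom
  unfold order_spiral_py order_spiral_py_alt
  by_cases h0 : origins = []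
  · simp [h0]
  · by_cases hneg : rows ≤ 0 ∨ cols ≤ 0
    · by_cases hz : rows = 0 ∨ cols = 0
      · rw [if_pos (Or.inr hz), if_pos (Or.inr (by omega))]
      · push_neg at hz
        rw [if_neg (by push_neg; exact ⟨h0, hz.1, hz.2⟩), if_pos (Or.inr (by omega))]
        simp only [aLoop_stop _ _ _ _ _ _
          (show ¬((0:Int) ≤ rows - 1 ∧ (0:Int) ≤ cols - 1) from by omega), List.filterMap_nil]
    · push_neg at hneg
      rw [if_neg (by push_neg; refine ⟨h0, by omega, by omega⟩), if_neg (by push_neg; exact ⟨h0, by omega, by omega⟩)]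
      have hm := pv_main origins rows cols (by omega) (by omega)
        (((rows - 1 - 0) + (cols - 1 - 0)).toNat + 1) 0 (rows - 1) 0 (cols - 1) []
        (by omega) (by omega) (by omega) (by omega) (by omega) (by omega)
      simp only [show (0:Int) - 1 = -1 from by ring, show cols - 1 - 0 + 1 = cols from by ring,
        show rows - 1 - 0 = rows - 1 from by ring, List.filterMap_nil] at hm
      exact hm.symm
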